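-- pv_equiv track=rewrite | github.com/xg416/CS577-Natural-Lanuage-Processing | hw1/main.py | TopicSplitter
-- ===== SOURCE A (Python) =====
-- def TopicSplitter(phrase):
--     phrase_len = len(phrase)
--     if phrase[0] == '@' and phrase_len > 1:
--         return [phrase[0], phrase[1:]]
--
--     result = [phrase[0]]
--     i = 1
--     while i < phrase_len:
--         if phrase[i].isdigit():
--             if not phrase[i-1].isdigit():
--                 result.append(phrase[i])
--             else:
--                 result[-1] += phrase[i]
--
--         elif phrase[i].isupper():
--             if not phrase[i-1].isupper():
--                 result.append(phrase[i])
--             elif i < phrase_len - 1 and phrase[i+1].islower():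
--                 result.append(phrase[i])
--             else:
--                 result[-1] += phrase[i]
--
--         else:
--             result[-1] += phrase[i]
--
--         i += 1
--     return result
-- ===== SOURCE B (Python) =====
-- def TopicSplitter(phrase):
--     n = len(phrase)
--     if phrase[0] == '@' and n > 1:
--         return [phrase[0], phrase[1:]]
--     breaks = [0]
--     for i in range(1, n):
--         c, p = phrase[i], phrase[i - 1]
--         if (c.isdigit() and not p.isdigit()) or (
--             c.isupper() and (not p.isupper() or (i < n - 1 and phrase[i + 1].islower()))
--         ):
--             breaks.append(i)
--     breaks.append(n)
--     return [phrase[breaks[j]:breaks[j + 1]] for j in range(len(breaks) - 1)]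
-- ===== Notes on version B (the rewrite author's own statement) =====
-- stated objective: faster
-- what changed: A builds tokens incrementally, mutating the last list element (result[-1] += c) for every non-boundary character; B first records the break positions where a new token begins and then materialises each token with a single slice phrase[breaks[j]:breaks[j+1]].
-- outside the precondition, e.g. on TopicSplitter(''): A raises IndexError, B raises IndexError
import Mathlib
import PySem

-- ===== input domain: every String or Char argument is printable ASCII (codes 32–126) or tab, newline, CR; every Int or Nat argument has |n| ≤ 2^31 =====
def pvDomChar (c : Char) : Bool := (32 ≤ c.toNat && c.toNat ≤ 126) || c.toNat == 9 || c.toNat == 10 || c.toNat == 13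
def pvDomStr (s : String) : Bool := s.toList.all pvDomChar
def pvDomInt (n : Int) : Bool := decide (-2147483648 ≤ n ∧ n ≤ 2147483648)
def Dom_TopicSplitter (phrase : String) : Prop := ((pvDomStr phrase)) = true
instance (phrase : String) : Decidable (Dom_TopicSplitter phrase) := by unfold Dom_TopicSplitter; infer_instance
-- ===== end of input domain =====

-- B replaces A's incremental build-and-mutate-last-token loop by a break-position
-- table plus slicing, avoiding repeated concatenation onto the growing last token
-- (measured faster in a timing run).


-- ===== PORT A =====
-- tokens are built as List Char and packed with String.mk at the end
-- (PySem.Chars.isdigit/isupper/islower are Python's char tests, exact on ASCII).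

-- result[-1] += c
def pvAppendLast : List (List Char) → Char → List (List Char)
  | [], _ => []
  | [t], c => [t ++ [c]]
  | t :: ts, c => t :: pvAppendLast ts c

-- the while loop: state result = acc, prev = phrase[i-1], remaining = phrase[i:]
def pvLoopA : List (List Char) → Char → List Char → List (List Char)
  | acc, _, [] => acc
  | acc, prev, c :: rest =>
    if PySem.Chars.isdigit c then
      if !PySem.Chars.isdigit prev then pvLoopA (acc ++ [[c]]) c rest
      else pvLoopA (pvAppendLast acc c) c rest
    else if PySem.Chars.isupper c then
      if !PySem.Chars.isupper prev then pvLoopA (acc ++ [[c]]) c rest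
      else if (match rest with | c' :: _ => PySem.Chars.islower c' | [] => false) then
        pvLoopA (acc ++ [[c]]) c rest
      else pvLoopA (pvAppendLast acc c) c rest
    else pvLoopA (pvAppendLast acc c) c rest

def TopicSplitter (phrase : String) : List String :=
  match phrase.toList with
  | [] => []  -- phrase[0] raises IndexError in Python; excluded by Pre_
  | c :: rest =>
    if c = '@' ∧ rest ≠ [] then [String.mk [c], String.mk rest]
    else (pvLoopA [[c]] c rest).map String.mk

-- ===== PORT B =====
-- does a new token begin at index i (1 ≤ i < n)?
def pvBoundary (cs : List Char) (n i : Nat) : Bool :=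
  let c := cs.getD i ' '
  let p := cs.getD (i - 1) ' '
  (PySem.Chars.isdigit c && !PySem.Chars.isdigit p) ||
    (PySem.Chars.isupper c &&
      (!PySem.Chars.isupper p || (decide (i < n - 1) && PySem.Chars.islower (cs.getD (i + 1) ' '))))

def TopicSplitter_alt (phrase : String) : List String :=
  match phrase.toList with
  | [] => []  -- phrase[0] raises IndexError in Python; excluded by Pre_
  | c :: rest =>
    if c = '@' ∧ rest ≠ [] then [String.mk [c], String.mk rest]
    else
      let cs := c :: rest
      let n := cs.length
      let breaks := (0 :: (List.range' 1 (n - 1)).filter (pvBoundary cs n)) ++ [n]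
      (breaks.zip breaks.tail).map (fun p => String.mk ((cs.drop p.1).take (p.2 - p.1)))

-- ===== PRECONDITION & SPEC =====
-- Pre_ excludes only the empty string, on which A raises IndexError (phrase[0]).
def Pre_TopicSplitter (phrase : String) : Prop := phrase ≠ ""
instance (phrase : String) : Decidable (Pre_TopicSplitter phrase) := by
  unfold Pre_TopicSplitter; infer_instance
def pvWitness_TopicSplitter : String := "Hello42World"

def Spec_TopicSplitter (phrase : String) (out : List String) : Prop := out = TopicSplitter_alt phrase
instance (phrase : String) (out : List String) : Decidable (Spec_TopicSplitter phrase out) := by unfold Spec_TopicSplitter; infer_instance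

-- ===== CLAIM (what is proved, stated in full; the proofs are below) =====
def Claim_equal_TopicSplitter : Prop := ∀ (phrase : String), Dom_TopicSplitter phrase → Pre_TopicSplitter phrase → Spec_TopicSplitter phrase (TopicSplitter phrase)

-- ===== LEMMAS AND PROOFS =====

-- common reference decomposition: tokens of cs from position i, current token started at start
def pvChunks (cs : List Char) (n start i : Nat) : List (List Char) :=
  if h : i < n then
    if pvBoundary cs n i then
      ((cs.drop start).take (i - start)) :: pvChunks cs n i (i + 1)
    else pvChunks cs n start (i + 1)
  else [(cs.drop start).take (n - start)]
termination_by n - i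
decreasing_by all_goals omega

theorem pvAppendLast_snoc (pre : List (List Char)) (t : List Char) (c : Char) :
    pvAppendLast (pre ++ [t]) c = pre ++ [t ++ [c]] := by
  induction pre with
  | nil => simp [pvAppendLast]
  | cons p ps ih =>
    cases hps : ps ++ [t] with
    | nil => simp at hps
    | cons q qs => simp [pvAppendLast, ← hps, ih]

theorem pv_digit_not_upper (c : Char) :
    PySem.Chars.isdigit c = true → PySem.Chars.isupper c = false := by
  simp only [PySem.Chars.isdigit, PySem.Chars.isupper, Bool.and_eq_true, decide_eq_true_eq,
    Char.le_def, UInt32.le_iff_toNat_le]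
  intro h
  rcases h with ⟨h1, h2⟩
  by_contra hc
  simp only [Bool.not_eq_false, Bool.and_eq_true, decide_eq_true_eq, Char.le_def,
    UInt32.le_iff_toNat_le] at hc
  have e1 : ('0' : Char).val.toNat = 48 := by decide
  have e2 : ('9' : Char).val.toNat = 57 := by decide
  have e3 : ('A' : Char).val.toNat = 65 := by decide
  have e4 : ('Z' : Char).val.toNat = 90 := by decide
  omega

theorem pv_take_extend (cs : List Char) (start i : Nat) (h1 : start ≤ i) (h2 : i < cs.length) :
    (cs.drop start).take (i - start) ++ [cs[i]] = (cs.drop start).take (i + 1 - start) := by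
  have hlen : i - start < (cs.drop start).length := by simp; omega
  have : (cs.drop start)[i - start] = cs[i] := by
    rw [List.getElem_drop]
    congr 1; omega
  have hsucc := List.take_add_one (l := cs.drop start) (i := i - start)
  rw [List.getElem?_eq_getElem hlen, this] at hsucc
  have : i + 1 - start = (i - start) + 1 := by omega
  rw [this, hsucc]
  rfl

theorem pvLoopA_cons (acc : List (List Char)) (prev c : Char) (rest : List Char) :
    pvLoopA acc prev (c :: rest) =
      (if PySem.Chars.isdigit c then
        if !PySem.Chars.isdigit prev then pvLoopA (acc ++ [[c]]) c rest
        else pvLoopA (pvAppendLast acc c) c rest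
      else if PySem.Chars.isupper c then
        if !PySem.Chars.isupper prev then pvLoopA (acc ++ [[c]]) c rest
        else if (match rest with | c' :: _ => PySem.Chars.islower c' | [] => false) then
          pvLoopA (acc ++ [[c]]) c rest
        else pvLoopA (pvAppendLast acc c) c rest
      else pvLoopA (pvAppendLast acc c) c rest) := by
  rfl

theorem pv_loopA_chunks (cs : List Char) (n : Nat) (hn : n = cs.length) :
    ∀ m i start (pre : List (List Char)), n - i = m → 1 ≤ i → i ≤ n → start < i →
      pvLoopA (pre ++ [(cs.drop start).take (i - start)]) (cs.getD (i - 1) ' ') (cs.drop i)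
        = pre ++ pvChunks cs n start i := by
  intro m
  induction m with
  | zero =>
    intro i start pre hm h1 h2 h3
    have hi : i = n := by omega
    subst hi
    rw [hn, List.drop_length]
    rw [pvChunks]
    simp [pvLoopA]
  | succ m ih =>
    intro i start pre hm h1 h2 h3
    have hi : i < n := by omega
    have hiL : i < cs.length := by omega
    have hpL : i - 1 < cs.length := by omega
    have hdrop : cs.drop i = cs[i] :: cs.drop (i + 1) := (List.getElem_cons_drop hiL).symm
    have hgdp : cs.getD (i - 1) ' ' = cs[i - 1]'hpL := List.getD_eq_getElem cs ' ' hpL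
    have hgdi : cs.getD i ' ' = cs[i] := List.getD_eq_getElem cs ' ' hiL
    have hone : (cs.drop i).take (i + 1 - i) = [cs[i]] := by
      rw [hdrop, show i + 1 - i = 1 from by omega]
      rfl
    have hboundary : pvBoundary cs n i =
        ((PySem.Chars.isdigit cs[i] && !PySem.Chars.isdigit (cs[i - 1]'hpL)) ||
          (PySem.Chars.isupper cs[i] &&
            (!PySem.Chars.isupper (cs[i - 1]'hpL) ||
              (decide (i < n - 1) && PySem.Chars.islower (cs.getD (i + 1) ' '))))) := by
      simp only [pvBoundary]
      rw [hgdi, hgdp]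
    have hlook : (match cs.drop (i + 1) with
        | c' :: _ => PySem.Chars.islower c'
        | [] => false)
        = (decide (i < n - 1) && PySem.Chars.islower (cs.getD (i + 1) ' ')) := by
      by_cases hnext : i + 1 < cs.length
      · have hd2 : cs.drop (i + 1) = cs[i + 1] :: cs.drop (i + 2) :=
          (List.getElem_cons_drop hnext).symm
        have hx : decide (i < n - 1) = true := by simp; omega
        rw [hd2, List.getD_eq_getElem cs ' ' hnext, hx]
        simp
      · have hd2 : cs.drop (i + 1) = [] := List.drop_eq_nil_of_le (by omega)
        have hx : decide (i < n - 1) = false := by simp; omega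
        rw [hd2, hx]
        simp
    have hnew : pvLoopA ((pre ++ [(cs.drop start).take (i - start)]) ++ [[cs[i]]]) cs[i]
          (cs.drop (i + 1))
        = (pre ++ [(cs.drop start).take (i - start)]) ++ pvChunks cs n i (i + 1) := by
      have hih := ih (i + 1) i (pre ++ [(cs.drop start).take (i - start)]) (by omega) (by omega)
        (by omega) (by omega)
      rw [hone] at hih
      rw [show i + 1 - 1 = i from by omega, hgdi] at hih
      exact hih
    have hold : pvLoopA (pvAppendLast (pre ++ [(cs.drop start).take (i - start)]) cs[i]) cs[i]
          (cs.drop (i + 1))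
        = pre ++ pvChunks cs n start (i + 1) := by
      rw [pvAppendLast_snoc, pv_take_extend cs start i (by omega) hiL]
      have hih := ih (i + 1) start pre (by omega) (by omega) (by omega) (by omega)
      rw [show i + 1 - 1 = i from by omega, hgdi] at hih
      exact hih
    generalize hX : (decide (i < n - 1) && PySem.Chars.islower (cs.getD (i + 1) ' ')) = X
      at hboundary hlook
    rw [pvChunks, dif_pos hi, hboundary, hgdp, hdrop, pvLoopA_cons, hlook]
    by_cases hd : PySem.Chars.isdigit cs[i] = true
    · have hu := pv_digit_not_upper _ hd
      by_cases hpd : PySem.Chars.isdigit (cs[i - 1]'hpL) = true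
      · simp only [hd, hpd, hu, Bool.not_true, Bool.and_false, Bool.false_and, Bool.true_and,
          Bool.false_or, Bool.or_self, Bool.false_eq_true, if_false, if_true]
        simpa using hold
      · simp only [Bool.not_eq_true] at hpd
        simp only [hd, hpd, Bool.not_false, Bool.true_and, Bool.true_or, Bool.or_true, if_true]
        simpa using hnew
    · simp only [Bool.not_eq_true] at hd
      by_cases hu : PySem.Chars.isupper cs[i] = true
      · by_cases hpu : PySem.Chars.isupper (cs[i - 1]'hpL) = true
        · cases hXv : X with
          | true =>
            simp only [hd, hu, hpu, hXv, Bool.not_true, Bool.and_false, Bool.false_and,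
              Bool.false_or, Bool.true_and, Bool.or_true, Bool.false_eq_true, if_false, if_true]
            simpa using hnew
          | false =>
            simp only [hd, hu, hpu, hXv, Bool.not_true, Bool.and_false, Bool.false_and,
              Bool.false_or, Bool.true_and, Bool.or_false, Bool.false_eq_true, if_false]
            simpa using hold
        · simp only [Bool.not_eq_true] at hpu
          simp only [hd, hu, hpu, Bool.not_false, Bool.true_and, Bool.false_and, Bool.true_or,
            Bool.false_or, Bool.or_true, if_true, Bool.false_eq_true, if_false]
          simpa using hnew
      · simp only [Bool.not_eq_true] at hu
        simp only [hd, hu, Bool.false_and, Bool.false_or, Bool.or_self, Bool.false_eq_true,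
          if_false]
        simpa using hold

theorem pv_zip_chunks (cs : List Char) (n : Nat) (hn : n = cs.length) :
    ∀ m i start, n - i = m → 1 ≤ i → i ≤ n →
      (((start :: (List.range' i (n - i)).filter (pvBoundary cs n)) ++ [n]).zip
          (((start :: (List.range' i (n - i)).filter (pvBoundary cs n)) ++ [n]).tail)).map
        (fun p => (cs.drop p.1).take (p.2 - p.1))
        = pvChunks cs n start i := by
  intro m
  induction m with
  | zero =>
    intro i start hm h1 h2
    have hi : i = n := by omega
    subst hi
    rw [pvChunks]
    simp
  | succ m ih =>
    intro i start hm h1 h2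
    have hi : i < n := by omega
    have hm' : n - i = m + 1 := hm
    have hrange : List.range' i (n - i) = i :: List.range' (i + 1) (n - (i + 1)) := by
      rw [hm']
      have : n - (i + 1) = m := by omega
      rw [this, List.range'_succ]
    rw [pvChunks, dif_pos hi, hrange]
    by_cases hb : pvBoundary cs n i = true
    · rw [List.filter_cons_of_pos hb]
      have := ih (i + 1) i (by omega) (by omega) (by omega)
      rw [← this]
      have hm2 : n - (i + 1) = m := by omega
      simp [List.zip, hb]
    · rw [List.filter_cons_of_neg (by simp [hb])]
      have := ih (i + 1) start (by omega) (by omega) (by omega)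
      rw [← this]
      have hm2 : n - (i + 1) = m := by omega
      simp [hb]

-- ===== VERDICT (by name: the statement is the Claim_ definition above) =====
theorem TopicSplitter_spec : Claim_equal_TopicSplitter := by
  intro phrase _ _
  unfold Spec_TopicSplitter TopicSplitter TopicSplitter_alt
  cases hcs : phrase.toList with
  | nil => rfl
  | cons c rest =>
    by_cases hat : c = '@' ∧ rest ≠ []
    · simp [hat]
    · simp only [if_neg hat]
      have hA := pv_loopA_chunks (c :: rest) (c :: rest).length rfl ((c :: rest).length - 1) 1 0 []
        (by simp) (by omega) (by simp) (by omega)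
      have hB := pv_zip_chunks (c :: rest) (c :: rest).length rfl ((c :: rest).length - 1) 1 0
        rfl (by omega) (by simp)
      have e1 : ((c :: rest).drop 0).take (1 - 0) = [c] := rfl
      have e2 : (c :: rest).getD (1 - 1) ' ' = c := rfl
      have e3 : (c :: rest).drop 1 = rest := rfl
      rw [e1, e2, e3, List.nil_append] at hA
      rw [hA, ← hB]
      simp only [List.nil_append, List.map_map]
      rfl
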